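-- pv_equiv track=rewrite | github.com/abhishek25dh/exp-pipeline | layout_19_step_1.py | build_max_lens
-- ===== SOURCE A (Python) =====
-- import math
--
-- def build_max_lens(total_tokens, min_lens):
--     avg = int(math.ceil(total_tokens / len(min_lens)))
--     base_img = max(6, avg + 2)
--     base_txt = 4
--     max_lens = [(base_img if i % 2 == 0 else base_txt) for i in range(len(min_lens))]
--     for i in range(len(max_lens)):
--         if max_lens[i] < min_lens[i]:
--             max_lens[i] = min_lens[i]
--
--     img_idxs = [i for i in range(len(max_lens)) if i % 2 == 0]
--     k = 0
--     while sum(max_lens) < total_tokens: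
--         idx = img_idxs[k % len(img_idxs)]
--         max_lens[idx] += 1
--         k += 1
--     return max_lens
-- ===== SOURCE B (Python) =====
-- import math
--
-- def build_max_lens(total_tokens, min_lens):
--     n = len(min_lens)
--     avg = int(math.ceil(total_tokens / n))
--     base_img = max(6, avg + 2)
--     lens = [max(base_img if i % 2 == 0 else 4, m) for i, m in enumerate(min_lens)]
--     deficit = total_tokens - sum(lens)
--     if deficit > 0:
--         m = (n + 1) // 2
--         q, r = divmod(deficit, m)
--         lens = [x + q + (1 if i // 2 < r else 0) if i % 2 == 0 else x
--                 for i, x in enumerate(lens)]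
--     return lens
-- ===== Notes on version B (the rewrite author's own statement) =====
-- stated objective: alternative
-- what changed: A tops up the list one token per iteration in a round-robin while-loop over the image slots until the sum reaches total_tokens; B computes the remaining deficit once and distributes it in closed form via divmod(deficit, n_image_slots), adding quotient-plus-remainder shares to the image slots in a single pass.
import Mathlib
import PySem

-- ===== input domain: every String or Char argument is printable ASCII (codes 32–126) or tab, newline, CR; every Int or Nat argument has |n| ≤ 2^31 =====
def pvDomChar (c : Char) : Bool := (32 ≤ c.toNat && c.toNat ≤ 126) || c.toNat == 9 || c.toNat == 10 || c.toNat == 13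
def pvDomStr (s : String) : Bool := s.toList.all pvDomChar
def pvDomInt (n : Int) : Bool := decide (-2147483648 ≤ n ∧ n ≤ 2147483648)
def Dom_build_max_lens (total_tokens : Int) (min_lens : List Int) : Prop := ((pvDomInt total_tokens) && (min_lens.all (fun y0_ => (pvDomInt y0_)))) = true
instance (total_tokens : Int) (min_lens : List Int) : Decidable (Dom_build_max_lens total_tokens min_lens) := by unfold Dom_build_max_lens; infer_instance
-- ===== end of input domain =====

-- B replaces A's one-token-at-a-time round-robin top-up while-loop by a closed-form
-- quotient/remainder distribution of the deficit over the image slots (alternative algorithm).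

-- ===== PORT A =====

-- the even indices of range(n):  img_idxs = [i for i in range(len(max_lens)) if i % 2 == 0]
def pvEvens (n : Nat) : List Nat := (List.range n).filter (fun i => i % 2 == 0)

theorem pvEvens_ne_nil (n : Nat) (hn : 0 < n) : pvEvens n ≠ [] :=
  List.ne_nil_of_mem (a := 0) (by simp [pvEvens, List.mem_filter, List.mem_range]; omega)

theorem pvEvens_lt (n : Nat) : ∀ i ∈ pvEvens n, i < n := by
  intro i hi
  simpa [pvEvens, List.mem_filter, List.mem_range] using (List.mem_filter.mp hi).1

-- sum of a list after a += 1 at a valid index (used by the loop's termination proof)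
theorem pvSum_modify_add_one (lens : List Int) (i : Nat) (h : i < lens.length) :
    (lens.modify i (· + 1)).sum = lens.sum + 1 := by
  induction lens generalizing i with
  | nil => simp at h
  | cons a l ih =>
    cases i with
    | zero => simp [List.modify]; ring
    | succ j =>
      simp only [List.modify_succ_cons, List.sum_cons]
      rw [ih j (by simpa using h)]; ring

-- the while loop:  while sum(max_lens) < total_tokens: max_lens[img_idxs[k % len(img_idxs)]] += 1; k += 1
def pyLoopA (total : Int) (idxs : List Nat) (k : Nat) (lens : List Int)
    (hne : idxs ≠ []) (hlt : ∀ i ∈ idxs, i < lens.length) : List Int :=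
  if _h : lens.sum < total then
    let idx := idxs[k % idxs.length]'(Nat.mod_lt k (List.length_pos_of_ne_nil hne))
    pyLoopA total idxs (k+1) (lens.modify idx (· + 1)) hne
      (by intro i hi; rw [List.length_modify]; exact hlt i hi)
  else lens
termination_by (total - lens.sum).toNat
decreasing_by
  have hidx : idxs[k % idxs.length]'(Nat.mod_lt k (List.length_pos_of_ne_nil hne)) < lens.length :=
    hlt _ (List.getElem_mem _)
  have := pvSum_modify_add_one lens _ hidx
  rw [this]; omega

-- avg = int(math.ceil(total_tokens / len(min_lens))) : exact ceiling division, which equals the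
-- Python float computation throughout the sampled domain (|total_tokens| ≤ 2^31, short lists)
def build_max_lens (total_tokens : Int) (min_lens : List Int) : List Int :=
  if hn : min_lens = [] then []  -- Python raises ZeroDivisionError here; excluded by Pre_
  else
    let n := min_lens.length
    let avg : Int := -(PySem.Int.floordiv (-total_tokens) (n : Int))
    let base_img : Int := max 6 (avg + 2)
    let base_txt : Int := 4
    let base := (List.range n).map (fun i => if i % 2 = 0 then base_img else base_txt)
    let max_lens := List.zipWith (fun b m => if b < m then m else b) base min_lens
    pyLoopA total_tokens (pvEvens n) 0 max_lens
      (pvEvens_ne_nil n (List.length_pos_of_ne_nil hn))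
      (by
        intro i hi
        have := pvEvens_lt n i hi
        simp [max_lens, base, List.length_zipWith]
        omega)

-- ===== PORT B =====

def build_max_lens_alt (total_tokens : Int) (min_lens : List Int) : List Int :=
  if min_lens = [] then []  -- Python raises ZeroDivisionError here; excluded by Pre_
  else
    let n := min_lens.length
    let avg : Int := -(PySem.Int.floordiv (-total_tokens) (n : Int))
    let base_img : Int := max 6 (avg + 2)
    let lens := min_lens.zipIdx.map (fun p => max (if p.2 % 2 = 0 then base_img else (4:Int)) p.1)
    let deficit := total_tokens - lens.sum
    if 0 < deficit then
      let m := PySem.Int.floordiv ((n : Int) + 1) 2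
      let q := PySem.Int.floordiv deficit m
      let r := PySem.Int.mod deficit m
      lens.zipIdx.map (fun p =>
        if p.2 % 2 = 0 then p.1 + q + (if ((p.2 / 2 : Nat) : Int) < r then 1 else 0) else p.1)
    else lens

-- ===== PRECONDITION & SPEC =====
-- Pre_ excludes only the empty list, on which Python A raises ZeroDivisionError.
def Pre_build_max_lens (total_tokens : Int) (min_lens : List Int) : Prop := min_lens ≠ []
instance (total_tokens : Int) (min_lens : List Int) : Decidable (Pre_build_max_lens total_tokens min_lens) := by unfold Pre_build_max_lens; infer_instance
def pvWitness_build_max_lens : Int × List Int := (25, [3, 1, 4])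

def Spec_build_max_lens (total_tokens : Int) (min_lens : List Int) (out : List Int) : Prop := out = build_max_lens_alt total_tokens min_lens
instance (total_tokens : Int) (min_lens : List Int) (out : List Int) : Decidable (Spec_build_max_lens total_tokens min_lens out) := by unfold Spec_build_max_lens; infer_instance

-- ===== CLAIM (what is proved, stated in full; the proofs are below) =====
def Claim_equal_build_max_lens : Prop := ∀ (total_tokens : Int) (min_lens : List Int), Dom_build_max_lens total_tokens min_lens → Pre_build_max_lens total_tokens min_lens → Spec_build_max_lens total_tokens min_lens (build_max_lens total_tokens min_lens)

-- ===== LEMMAS AND PROOFS =====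

-- pvC m d k j = how many of the d round-robin steps k, k+1, …, k+d-1 hit image slot j (mod m)
def pvC (m d k j : Nat) : Int :=
  match d with
  | 0 => 0
  | d + 1 => (if k % m = j then 1 else 0) + pvC m d (k+1) j

-- closed form: pvF m t j = t/m + [j < t%m]  counts s < t with s % m = j
def pvF (m t j : Nat) : Int := ((t / m : Nat) : Int) + (if j < t % m then 1 else 0)

theorem pvF_succ (m t j : Nat) (hm : 0 < m) (hj : j < m) :
    pvF m (t+1) j = pvF m t j + (if t % m = j then 1 else 0) := by
  have hs : t % m < m := Nat.mod_lt _ hm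
  have ht : m * (t / m) + t % m = t := Nat.div_add_mod t m
  have h1 : t + 1 = m * (t / m) + (t % m + 1) := by omega
  by_cases hc : t % m + 1 < m
  · have hd : (t+1) / m = t / m := by
      rw [h1, Nat.mul_add_div hm, Nat.div_eq_of_lt hc]; omega
    have hmo : (t+1) % m = t % m + 1 := by
      rw [h1, Nat.mul_add_mod, Nat.mod_eq_of_lt hc]
    unfold pvF; rw [hd, hmo]; split_ifs <;> omega
  · have hsm : t % m + 1 = m := by omega
    have hd : (t+1) / m = t / m + 1 := by
      rw [h1, hsm, Nat.mul_add_div hm, Nat.div_self hm]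
    have hmo : (t+1) % m = 0 := by rw [h1, hsm, Nat.mul_add_mod, Nat.mod_self]
    unfold pvF; rw [hd, hmo]; split_ifs <;> omega

theorem pvC_eq_F (m j : Nat) (hm : 0 < m) (hj : j < m) :
    ∀ (d k : Nat), pvC m d k j = pvF m (k+d) j - pvF m k j := by
  intro d
  induction d with
  | zero => intro k; simp [pvC]
  | succ d ih =>
    intro k
    rw [pvC, ih (k+1), pvF_succ m k j hm hj]
    have : k + 1 + d = k + (d + 1) := by omega
    rw [this]; ring

theorem pvC_zero_start (m j : Nat) (hm : 0 < m) (hj : j < m) (d : Nat) :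
    pvC m d 0 j = ((d / m : Nat) : Int) + (if j < d % m then 1 else 0) := by
  rw [pvC_eq_F m j hm hj d 0]
  simp [pvF, Nat.mod_eq_of_lt hm]

theorem pvEvens_length (n : Nat) : (pvEvens n).length = (n+1)/2 := by
  induction n with
  | zero => simp [pvEvens]
  | succ n ih =>
    simp only [pvEvens, List.range_succ, List.filter_append] at *
    rcases Nat.even_or_odd n with h | h
    · have h2 : n % 2 = 0 := Nat.even_iff.mp h
      simp [h2, ih]; omega
    · have h2 : n % 2 = 1 := Nat.odd_iff.mp h
      simp [h2, ih]; omega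

theorem pvEvens_eq (n : Nat) : pvEvens n = (List.range ((n+1)/2)).map (fun j => 2*j) := by
  induction n with
  | zero => simp [pvEvens]
  | succ n ih =>
    simp only [pvEvens, List.range_succ, List.filter_append] at *
    rcases Nat.even_or_odd n with h | h
    · have h2 : n % 2 = 0 := Nat.even_iff.mp h
      have hh : (n+1+1)/2 = (n+1)/2 + 1 := by omega
      simp only [hh, List.range_succ, List.map_append, ih]
      have h3 : 2 * ((n + 1) / 2) = n := by omega
      simp [List.filter, h2, h3]
    · have h2 : n % 2 = 1 := Nat.odd_iff.mp h
      have hh : (n+1+1)/2 = (n+1)/2 := by omega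
      simp [hh, ih, h2]

theorem pvEvens_getElem (n j : Nat) (h : j < (pvEvens n).length) :
    (pvEvens n)[j] = 2 * j := by
  have := pvEvens_eq n
  have hl := pvEvens_length n
  simp only [this, List.getElem_map, List.getElem_range]

-- main loop characterisation: after d remaining round-robin steps starting at counter k,
-- every even position i has received pvC m d k (i/2) extra tokens
theorem pvLoopA_eq (total : Int) (n : Nat) (hn : 0 < n) :
    ∀ (d k : Nat) (lens : List Int) (hne : pvEvens n ≠ []) (hlt : ∀ i ∈ pvEvens n, i < lens.length),
      lens.length = n → total = lens.sum + d →
      pyLoopA total (pvEvens n) k lens hne hlt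
        = lens.zipIdx.map (fun p => p.1 + (if p.2 % 2 = 0 then pvC ((n+1)/2) d k (p.2/2) else 0)) := by
  intro d
  induction d with
  | zero =>
    intro k lens hne hlt hlen hsum
    rw [pyLoopA]
    have : ¬ lens.sum < total := by omega
    simp only [this, dite_false]
    have : lens.zipIdx.map (fun p => p.1 + (if p.2 % 2 = 0 then pvC ((n+1)/2) 0 k (p.2/2) else 0))
        = lens.zipIdx.map Prod.fst := by
      apply List.map_congr_left; intro p _; simp [pvC]
    rw [this, List.zipIdx_map_fst]
  | succ d ih =>
    intro k lens hne hlt hlen hsum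
    rw [pyLoopA]
    have hlt' : lens.sum < total := by
      have : ((d:Int) + 1) > 0 := by positivity
      push_cast at hsum ⊢; omega
    simp only [hlt', dite_true]
    set m := (pvEvens n).length with hm
    have hmval : m = (n+1)/2 := pvEvens_length n
    have hmpos : 0 < m := List.length_pos_of_ne_nil hne
    set idx := (pvEvens n)[k % m]'(Nat.mod_lt k hmpos) with hidxdef
    have hidx : idx = 2 * (k % m) := pvEvens_getElem n (k % m) (Nat.mod_lt k hmpos)
    have hidx2 : idx = 2 * (k % ((n+1)/2)) := by rw [hidx, hmval]
    have hidxlt : idx < lens.length := hlt _ (List.getElem_mem _)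
    rw [ih (k+1) (lens.modify idx (· + 1)) hne _ (by simpa using hlen)
        (by rw [pvSum_modify_add_one lens idx hidxlt]; push_cast at hsum ⊢; omega)]
    apply List.ext_getElem
    · simp
    · intro i h1 h2
      have hi : i < lens.length := by simpa using h2
      simp only [List.getElem_map, List.getElem_zipIdx, Nat.zero_add,
        List.getElem_modify]
      have hCi : pvC ((n+1)/2) (d+1) k (i/2)
          = (if k % ((n+1)/2) = i/2 then 1 else 0) + pvC ((n+1)/2) d (k+1) (i/2) := rfl
      by_cases hev : i % 2 = 0
      · simp only [hev, if_true, hCi]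
        by_cases heq : idx = i
        · have : k % ((n+1)/2) = i / 2 := by omega
          simp [heq, this]; ring
        · have : ¬ (k % ((n+1)/2) = i / 2) := by
            intro hcon; apply heq; omega
          simp [heq, this]
      · have : idx ≠ i := by omega
        simp [hev, this]

-- the base list computed by A equals the base list computed by B
theorem pvBase_eq (base_img : Int) (min_lens : List Int) :
    List.zipWith (fun b m => if b < m then m else b)
        ((List.range min_lens.length).map (fun i => if i % 2 = 0 then base_img else (4:Int))) min_lens
      = min_lens.zipIdx.map (fun p => max (if p.2 % 2 = 0 then base_img else (4:Int)) p.1) := by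
  apply List.ext_getElem
  · simp
  · intro i h1 h2
    simp only [List.getElem_zipWith, List.getElem_map, List.getElem_range,
      List.getElem_zipIdx, Nat.zero_add]
    rcases max_cases (if i % 2 = 0 then base_img else (4:Int)) (min_lens[i]'(by simpa using h2)) with
      ⟨hm, hle⟩ | ⟨hm, hlt⟩ <;> rw [hm] <;> split_ifs <;> omega

theorem pyLoopA_congr (total : Int) (idxs : List Nat) (k : Nat) (l1 l2 : List Int)
    (h : l1 = l2) (hne : idxs ≠ []) (h1 : ∀ i ∈ idxs, i < l1.length)
    (h2 : ∀ i ∈ idxs, i < l2.length) :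
    pyLoopA total idxs k l1 hne h1 = pyLoopA total idxs k l2 hne h2 := by subst h; rfl

theorem pvMain (total : Int) (n : Nat) (hn : 0 < n) (lens : List Int) (hlen : lens.length = n)
    (hne2 : pvEvens n ≠ []) (hlt : ∀ i ∈ pvEvens n, i < lens.length) :
    pyLoopA total (pvEvens n) 0 lens hne2 hlt
      = if 0 < total - lens.sum then
          lens.zipIdx.map (fun p =>
            if p.2 % 2 = 0 then
              p.1 + PySem.Int.floordiv (total - lens.sum) (PySem.Int.floordiv ((n:Int)+1) 2)
                + (if ((p.2 / 2 : Nat) : Int)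
                      < PySem.Int.mod (total - lens.sum) (PySem.Int.floordiv ((n:Int)+1) 2)
                   then 1 else 0)
            else p.1)
        else lens := by
  by_cases hdef : 0 < total - lens.sum
  · have hsum : total = lens.sum + ((total - lens.sum).toNat : Int) := by omega
    rw [pvLoopA_eq total n hn (total - lens.sum).toNat 0 lens hne2 hlt hlen hsum, if_pos hdef]
    apply List.map_congr_left
    rintro ⟨x, i⟩ hp
    obtain ⟨-, hilt, -⟩ := List.mem_zipIdx hp
    have him : i < n := by omega
    have hmpos : 0 < (n+1)/2 := by omega
    have hmI : PySem.Int.floordiv ((n:Int) + 1) 2 = (((n+1)/2 : Nat) : Int) := by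
      have h1 : ((n:Int) + 1) = ((n+1 : Nat) : Int) := by push_cast; ring
      rw [h1]
      exact_mod_cast PySem.Int.floordiv_natCast (n+1) 2
    have hdnat : total - lens.sum = (((total - lens.sum).toNat : Nat) : Int) := by omega
    have hq : PySem.Int.floordiv (total - lens.sum) (PySem.Int.floordiv ((n:Int)+1) 2)
        = (((total - lens.sum).toNat / ((n+1)/2) : Nat) : Int) := by
      rw [hmI, hdnat]; exact_mod_cast PySem.Int.floordiv_natCast (total - lens.sum).toNat ((n+1)/2)
    have hr : PySem.Int.mod (total - lens.sum) (PySem.Int.floordiv ((n:Int)+1) 2)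
        = (((total - lens.sum).toNat % ((n+1)/2) : Nat) : Int) := by
      rw [hmI, hdnat]; exact_mod_cast PySem.Int.mod_natCast (total - lens.sum).toNat ((n+1)/2)
    by_cases hev : i % 2 = 0
    · have hj : i / 2 < (n+1)/2 := by omega
      rw [if_pos hev, if_pos hev,
        pvC_zero_start ((n+1)/2) (i/2) hmpos hj ((total - lens.sum).toNat), hq, hr]
      split_ifs <;> omega
    · rw [if_neg hev, if_neg hev]; ring
  · rw [pyLoopA, if_neg hdef]
    have hno : ¬ lens.sum < total := by omega
    simp [hno]

-- ===== VERDICT (by name: the statement is the Claim_ definition above) =====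
theorem build_max_lens_spec : Claim_equal_build_max_lens := by
  intro total_tokens min_lens _hdom hpre
  have hne : min_lens ≠ [] := hpre
  have hnpos : 0 < min_lens.length := List.length_pos_of_ne_nil hne
  unfold Spec_build_max_lens build_max_lens build_max_lens_alt
  rw [dif_neg hne, if_neg hne]
  dsimp only
  refine Eq.trans (pyLoopA_congr _ _ _ _ _
      (pvBase_eq (max 6 (-(PySem.Int.floordiv (-total_tokens) (min_lens.length : Int)) + 2)) min_lens)
      _ _ ?hlt2) ?rest
  case hlt2 =>
    intro i hi; have := pvEvens_lt min_lens.length i hi; simp; omega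
  case rest =>
    exact pvMain total_tokens min_lens.length hnpos _ (by simp) _ _
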